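-- pv_equiv track=rewrite | github.com/Shubhamiiit2012/python_training | manager.py | find_highest_rated_movie_by_year
-- ===== SOURCE A (Python) =====
-- def find_highest_rated_movie_by_year(movies_dict):
--     rating_by_year_map={}
--
--     for line in movies_dict:
--         if movies_dict[line][1] in rating_by_year_map:
--             if movies_dict[line][2] > movies_dict[rating_by_year_map[movies_dict[line][1]] ][2]:
--                 rating_by_year_map[movies_dict[line][1]] = line
--         else :
--             rating_by_year_map[movies_dict[line][1]]=line
--     return rating_by_year_map
-- ===== SOURCE B (Python) =====
-- def find_highest_rated_movie_by_year(movies_dict):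
--     # Phase 1: group movie names by year (first-occurrence order of years).
--     groups = {}
--     for name, info in movies_dict.items():
--         groups.setdefault(info[1], []).append(name)
--     # Phase 2: per year pick the first highest-rated name (max returns the
--     # first maximal element, matching A's strict '>' tie-breaking).
--     return {year: max(names, key=lambda n: movies_dict[n][2])
--             for year, names in groups.items()}
-- ===== Notes on version B (the rewrite author's own statement) =====
-- stated objective: alternative
-- what changed: Replaces A's single-pass running-max scan (dict year -> current best key, updated on strict '>') with a two-phase group-then-reduce: first build a table year -> list of movie names, then pick each year's winner with max(names, key=rating), relying on max returning the first maximal element to reproduce A's tie-breaking.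
import Mathlib
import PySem

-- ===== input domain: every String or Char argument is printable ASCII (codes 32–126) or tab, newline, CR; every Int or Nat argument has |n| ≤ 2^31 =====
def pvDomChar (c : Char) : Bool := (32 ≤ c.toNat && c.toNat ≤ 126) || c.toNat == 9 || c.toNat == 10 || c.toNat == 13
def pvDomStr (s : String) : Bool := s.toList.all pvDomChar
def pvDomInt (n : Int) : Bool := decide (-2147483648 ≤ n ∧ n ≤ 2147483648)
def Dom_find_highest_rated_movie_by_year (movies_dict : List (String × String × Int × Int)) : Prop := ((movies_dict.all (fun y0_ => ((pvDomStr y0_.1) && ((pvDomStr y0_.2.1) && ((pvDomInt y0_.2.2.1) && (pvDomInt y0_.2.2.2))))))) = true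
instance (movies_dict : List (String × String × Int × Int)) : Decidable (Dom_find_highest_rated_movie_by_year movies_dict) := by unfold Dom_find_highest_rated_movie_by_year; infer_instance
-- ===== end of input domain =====

-- B replaces A's single-pass running-max scan by a two-phase group-by-year then
-- per-year max(key=rating) reduce (objective: alternative decomposition, same cost).

-- ===== PORT A =====
-- A iterates over the dict's keys keeping, per year, the key of the best movie so far
-- (strict '>', so the first of equally rated movies wins).
def find_highest_rated_movie_by_year (movies_dict : List (String × String × Int × Int)) : List (Int × String) :=
  let d := PySem.Dict.ofList movies_dict
  let rating_by_year_map : PySem.Dict Int String :=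
    d.keys.foldl (fun m line =>
      if m.contains (d.getD line ("", 0, 0)).2.1 then
        if (d.getD line ("", 0, 0)).2.2 >
            (d.getD (m.getD (d.getD line ("", 0, 0)).2.1 "") ("", 0, 0)).2.2 then
          m.insert (d.getD line ("", 0, 0)).2.1 line
        else m
      else m.insert (d.getD line ("", 0, 0)).2.1 line) PySem.Dict.empty
  rating_by_year_map.items

-- ===== PORT B =====
-- Source B: groups.setdefault(info[1], []).append(name) is d[k] = d.get(k, []) + [name],
-- i.e. Dict.modify; the comprehension maps max(names, key=rating) over the groups.
def find_highest_rated_movie_by_year_alt (movies_dict : List (String × String × Int × Int)) : List (Int × String) :=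
  let d := PySem.Dict.ofList movies_dict
  let groups : PySem.Dict Int (List String) :=
    d.items.foldl (fun g p => g.modify p.2.2.1 [] (· ++ [p.1])) PySem.Dict.empty
  groups.items.map (fun q =>
    (q.1, (PySem.List.max? q.2 (fun n => (d.getD n ("", 0, 0)).2.2)).getD ""))

-- ===== PRECONDITION & SPEC =====
def Spec_find_highest_rated_movie_by_year (movies_dict : List (String × String × Int × Int)) (out : List (Int × String)) : Prop := out = find_highest_rated_movie_by_year_alt movies_dict
instance (movies_dict : List (String × String × Int × Int)) (out : List (Int × String)) : Decidable (Spec_find_highest_rated_movie_by_year movies_dict out) := by unfold Spec_find_highest_rated_movie_by_year; infer_instance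

-- ===== CLAIM (what is proved, stated in full; the proofs are below) =====
def Claim_equal_find_highest_rated_movie_by_year : Prop := ∀ (movies_dict : List (String × String × Int × Int)), Dom_find_highest_rated_movie_by_year movies_dict → Spec_find_highest_rated_movie_by_year movies_dict (find_highest_rated_movie_by_year movies_dict)

-- ===== LEMMAS AND PROOFS =====

-- the movie table, rating / year of a movie name, best (first highest-rated) name of a group
def pvRt (d : PySem.Dict String (String × Int × Int)) (n : String) : Int :=
  (d.getD n ("", 0, 0)).2.2

def pvBest (d : PySem.Dict String (String × Int × Int)) (ns : List String) : String :=
  (PySem.List.max? ns (pvRt d)).getD ""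

def pvF (d : PySem.Dict String (String × Int × Int)) (q : Int × List String) : Int × String :=
  (q.1, pvBest d q.2)

-- A's loop body and B's grouping loop body, over a key of d
def pvStepA (d : PySem.Dict String (String × Int × Int))
    (m : PySem.Dict Int String) (line : String) : PySem.Dict Int String :=
  if m.contains (d.getD line ("", 0, 0)).2.1 then
    if (d.getD line ("", 0, 0)).2.2 >
        (d.getD (m.getD (d.getD line ("", 0, 0)).2.1 "") ("", 0, 0)).2.2 then
      m.insert (d.getD line ("", 0, 0)).2.1 line
    else m
  else m.insert (d.getD line ("", 0, 0)).2.1 line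

def pvStepG (d : PySem.Dict String (String × Int × Int))
    (g : PySem.Dict Int (List String)) (k : String) : PySem.Dict Int (List String) :=
  g.modify (d.getD k ("", 0, 0)).2.1 [] (· ++ [k])

theorem pv_max?_append_singleton {α κ : Type} [LT κ] [DecidableLT κ]
    (ns : List α) (k : α) (key : α → κ) :
    PySem.List.max? (ns ++ [k]) key =
      match PySem.List.max? ns key with
      | none => some k
      | some m => if key m < key k then some k else some m := by
  simp only [PySem.List.max?, List.foldl_append, List.foldl_cons, List.foldl_nil]
  rfl

theorem pv_get?_map (d : PySem.Dict String (String × Int × Int))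
    (its : List (Int × List String)) (y : Int) :
    (PySem.Dict.mk (its.map (pvF d))).get? y =
      ((PySem.Dict.mk its : PySem.Dict Int (List String)).get? y).map (pvBest d) := by
  induction its with
  | nil => simp [PySem.Dict.get?]
  | cons p t ih =>
    by_cases h : p.1 = y
    · have hb : (p.1 == y) = true := by simp [h]
      simp [PySem.Dict.get?, pvF, hb]
    · have hb : (p.1 == y) = false := by simp [h]
      simpa [PySem.Dict.get?, pvF, hb] using ih

theorem pv_contains_map (d : PySem.Dict String (String × Int × Int))
    (its : List (Int × List String)) (y : Int) :
    (PySem.Dict.mk (its.map (pvF d))).contains y =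
      (PySem.Dict.mk its : PySem.Dict Int (List String)).contains y := by
  simp [PySem.Dict.contains, List.any_map, Function.comp_def, pvF]

-- one step preserves the simulation invariant
theorem pv_step_inv (d : PySem.Dict String (String × Int × Int))
    (m : PySem.Dict Int String) (g : PySem.Dict Int (List String)) (k : String)
    (h1 : m.items = g.items.map (pvF d)) (h2 : g.keys.Nodup)
    (h3 : ∀ q ∈ g.items, q.2 ≠ []) :
    (pvStepA d m k).items = (pvStepG d g k).items.map (pvF d)
    ∧ (pvStepG d g k).keys.Nodup
    ∧ ∀ q ∈ (pvStepG d g k).items, q.2 ≠ [] := by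
  have hmk : m = PySem.Dict.mk (g.items.map (pvF d)) := PySem.Dict.ext h1
  subst hmk
  set y := (d.getD k ("", 0, 0)).2.1 with hy
  have hcont : (PySem.Dict.mk (g.items.map (pvF d))).contains y = g.contains y :=
    pv_contains_map d g.items y
  have hget := pv_get?_map d g.items y
  by_cases hc : g.contains y = true
  · -- year already present: A updates on strict '>', B appends to the group
    obtain ⟨ns, hns⟩ : ∃ ns, g.get? y = some ns := by
      rcases h : g.get? y with _ | ns
      · rw [PySem.Dict.get?_eq_none_iff_contains] at h; rw [h] at hc; cases hc
      · exact ⟨ns, rfl⟩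
    have hmem : (y, ns) ∈ g.items := PySem.Dict.mem_items_of_get?_eq_some g hns
    have hne : ns ≠ [] := h3 _ hmem
    have hgetD : g.getD y [] = ns := by simp [PySem.Dict.getD, hns]
    obtain ⟨m0, hm0⟩ : ∃ m0, PySem.List.max? ns (pvRt d) = some m0 := by
      rcases h : PySem.List.max? ns (pvRt d) with _ | m0
      · exact absurd ((PySem.List.max?_eq_none_iff ns (pvRt d)).mp h) hne
      · exact ⟨m0, rfl⟩
    have hbest : pvBest d ns = m0 := by simp [pvBest, hm0]
    have hmget : (PySem.Dict.mk (g.items.map (pvF d))).getD y "" = m0 := by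
      simp [PySem.Dict.getD, hget, hns, hbest]
    have hmax := pv_max?_append_singleton ns k (pvRt d)
    rw [hm0] at hmax
    have hstepG : (pvStepG d g k).items =
        g.items.map (fun p => if p.1 == y then (y, ns ++ [k]) else p) := by
      rw [pvStepG, PySem.Dict.modify, hgetD]
      exact PySem.Dict.items_insert_of_contains g _ hc
    have hval : ∀ p ∈ g.items, p.1 = y → p.2 = ns := by
      intro p hp hpy
      have := PySem.Dict.get?_of_mem_items g (k := p.1) (v := p.2)
        (by exact hp) h2
      rw [hpy, hns] at this
      exact (Option.some.injEq _ _ ▸ this).symm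
    have hcontm : (PySem.Dict.mk (g.items.map (pvF d))).contains y = true := by
      rw [hcont]; exact hc
    refine ⟨?_, ?_, ?_⟩
    · by_cases hgt : (d.getD k ("", 0, 0)).2.2 > (d.getD m0 ("", 0, 0)).2.2
      · -- new movie strictly better: both replace the year's entry by k
        have hlt : pvRt d m0 < pvRt d k := hgt
        have hA : (pvStepA d (PySem.Dict.mk (g.items.map (pvF d))) k).items =
            (g.items.map (pvF d)).map (fun p => if p.1 == y then (y, k) else p) := by
          rw [pvStepA]
          rw [← hy, hcontm, hmget]
          simp only [if_true, if_pos hgt]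
          exact PySem.Dict.items_insert_of_contains _ _ hcontm
        rw [hA, hstepG, List.map_map, List.map_map]
        refine List.map_congr_left ?_
        intro p hp
        by_cases hpy : p.1 = y
        · have hp2 : p.2 = ns := hval p hp hpy
          simp [Function.comp, pvF, hpy, hp2, pvBest, hmax, if_pos hlt]
        · simp [Function.comp, pvF, hpy]
      · -- not strictly better: A keeps its entry, the group's first max is unchanged
        have hnlt : ¬ pvRt d m0 < pvRt d k := hgt
        have hA : (pvStepA d (PySem.Dict.mk (g.items.map (pvF d))) k).items =
            g.items.map (pvF d) := by
          rw [pvStepA]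
          rw [← hy, hcontm, hmget]
          simp only [if_true, if_neg hgt]
        rw [hA, hstepG, List.map_map]
        refine List.map_congr_left ?_
        intro p hp
        by_cases hpy : p.1 = y
        · have hp2 : p.2 = ns := hval p hp hpy
          simp [Function.comp, pvF, hpy, hp2, pvBest, hmax, if_neg hnlt, hm0]
        · simp [Function.comp, pvF, hpy]
    · exact PySem.Dict.nodup_keys_insert _ _ _ h2
    · intro q hq
      rw [hstepG] at hq
      obtain ⟨p, hp, hpq⟩ := List.mem_map.mp hq
      by_cases hpy : p.1 = y
      · simp only [hpy, BEq.rfl, if_pos] at hpq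
        rw [← hpq]; simp
      · have : (p.1 == y) = false := by simp [hpy]
        rw [this] at hpq; simp only [Bool.false_eq_true] at hpq
        rw [← hpq]; exact h3 p hp
  · -- first movie of this year: both append a fresh entry
    have hcf : g.contains y = false := by simpa using hc
    have hcontm : (PySem.Dict.mk (g.items.map (pvF d))).contains y = false := by
      rw [hcont]; exact hcf
    have hgetD : g.getD y [] = [] := PySem.Dict.getD_of_not_contains g [] hcf
    have hstepG : (pvStepG d g k).items = g.items ++ [(y, [k])] := by
      rw [pvStepG, PySem.Dict.modify, hgetD]
      exact PySem.Dict.items_insert_of_not_contains g _ hcf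
    refine ⟨?_, ?_, ?_⟩
    · have hA : (pvStepA d (PySem.Dict.mk (g.items.map (pvF d))) k).items =
          g.items.map (pvF d) ++ [(y, k)] := by
        rw [pvStepA]
        rw [← hy, hcontm]
        simp only [Bool.false_eq_true]
        exact PySem.Dict.items_insert_of_not_contains _ _ hcontm
      rw [hA, hstepG, List.map_append]
      simp [pvF, pvBest, PySem.List.max?]
    · exact PySem.Dict.nodup_keys_insert _ _ _ h2
    · intro q hq
      rw [hstepG] at hq
      rcases List.mem_append.mp hq with h | h
      · exact h3 q h
      · simp only [List.mem_singleton] at h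
        rw [h]; simp

theorem pv_fold_inv (d : PySem.Dict String (String × Int × Int)) (ks : List String)
    (m : PySem.Dict Int String) (g : PySem.Dict Int (List String))
    (h1 : m.items = g.items.map (pvF d)) (h2 : g.keys.Nodup)
    (h3 : ∀ q ∈ g.items, q.2 ≠ []) :
    (ks.foldl (pvStepA d) m).items = (ks.foldl (pvStepG d) g).items.map (pvF d) := by
  induction ks generalizing m g with
  | nil => simpa using h1
  | cons k t ih =>
    obtain ⟨i1, i2, i3⟩ := pv_step_inv d m g k h1 h2 h3
    simpa using ih (pvStepA d m k) (pvStepG d g k) i1 i2 i3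

-- ===== VERDICT (by name: the statement is the Claim_ definition above) =====
theorem find_highest_rated_movie_by_year_spec : Claim_equal_find_highest_rated_movie_by_year := by
  intro movies_dict _
  unfold Spec_find_highest_rated_movie_by_year
  have hn : (PySem.Dict.ofList movies_dict).keys.Nodup :=
    PySem.Dict.nodup_keys_ofList movies_dict
  have hitems := PySem.Dict.items_eq_map_keys (PySem.Dict.ofList movies_dict) hn ("", 0, 0)
  show (List.foldl (pvStepA (PySem.Dict.ofList movies_dict)) PySem.Dict.empty
          (PySem.Dict.ofList movies_dict).keys).items
      = (List.foldl (fun g p => g.modify p.2.2.1 [] (· ++ [p.1])) PySem.Dict.empty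
          (PySem.Dict.ofList movies_dict).items).items.map (pvF (PySem.Dict.ofList movies_dict))
  rw [hitems, List.foldl_map]
  exact pv_fold_inv _ _ _ _ rfl (by simp [PySem.Dict.keys, PySem.Dict.empty])
    (by simp [PySem.Dict.empty])
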